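-- pv_equiv track=rewrite | github.com/Bob-A-Dook/Youtube_Biotech_Comments | biotech-youtube.py | _get_url_counts
-- ===== SOURCE A (Python) =====
-- from collections import Counter
--
-- def _get_url_counts( connections ):
--     '''
--     Counts the websites which suspected comments are linking to
--     and groups them by domains (e.g. youtube.com)
--     '''
--     destinations = [dest for _,dest,_,_ in connections]
--     counts = sorted( list( Counter( destinations ).items()),
--                      key=lambda x: x[1] ) # By number
--
--     counts_by_domain = {}
--     for url_info, num in counts:
--         url, domain = url_info
--         try: counts_by_domain[ domain ].append( (url,num) )
--         except KeyError: counts_by_domain[ domain ] = [(url,num)]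
--
--     return counts_by_domain
-- ===== SOURCE B (Python) =====
-- from collections import Counter
--
-- def _get_url_counts(connections):
--     '''
--     Counts the websites which suspected comments are linking to
--     and groups them by domains (e.g. youtube.com)
--     '''
--     counts = Counter(dest for _, dest, _, _ in connections)
--
--     by_count = {}
--     for (url, domain), num in counts.items():
--         by_count.setdefault(num, []).append((url, domain))
--
--     counts_by_domain = {}
--     for num in sorted(by_count):
--         for url, domain in by_count[num]:
--             counts_by_domain.setdefault(domain, []).append((url, num))
--     return counts_by_domain
-- ===== Notes on version B (the rewrite author's own statement) =====
-- stated objective: alternative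
-- what changed: B replaces the global comparison sort of all (url,count) Counter items by a bucket (counting) sort: one pass groups the Counter items by their count into a dict of buckets, then the distinct count values are sorted and the buckets emitted in order, grouping urls into domains as they come.
import Mathlib
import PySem

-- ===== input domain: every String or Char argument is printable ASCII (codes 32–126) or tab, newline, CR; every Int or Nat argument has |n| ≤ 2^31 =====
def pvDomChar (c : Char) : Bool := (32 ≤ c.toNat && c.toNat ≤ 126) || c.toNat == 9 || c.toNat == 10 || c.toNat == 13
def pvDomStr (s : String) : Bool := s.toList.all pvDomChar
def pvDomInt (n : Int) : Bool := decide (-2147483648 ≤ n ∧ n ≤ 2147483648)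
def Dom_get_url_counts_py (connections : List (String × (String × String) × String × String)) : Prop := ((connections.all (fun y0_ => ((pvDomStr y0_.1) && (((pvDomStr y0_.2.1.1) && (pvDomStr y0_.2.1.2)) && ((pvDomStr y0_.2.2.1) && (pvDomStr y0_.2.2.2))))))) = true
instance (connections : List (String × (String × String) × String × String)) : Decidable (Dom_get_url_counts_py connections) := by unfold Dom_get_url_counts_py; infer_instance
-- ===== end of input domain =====

-- ===== PORT A =====
-- B replaces the global comparison sort of the Counter items by a bucket (counting) sort
-- over the distinct count values; same return value, objective: alternative.
-- Neither version mutates its argument.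
def get_url_counts_py (connections : List (String × (String × String) × String × String)) : List (String × List (String × Int)) :=
  let destinations := connections.map (fun c => c.2.1)
  let counts := PySem.List.sorted (PySem.Dict.counter destinations).items (fun x => x.2)
  let counts_by_domain := counts.foldl (fun d p =>
      match d.get? p.1.2 with
      | some lst => d.insert p.1.2 (lst ++ [(p.1.1, p.2)])
      | none => d.insert p.1.2 [(p.1.1, p.2)]) PySem.Dict.empty
  counts_by_domain.items

-- ===== PORT B =====
def get_url_counts_py_alt (connections : List (String × (String × String) × String × String)) : List (String × List (String × Int)) :=
  let counts := PySem.Dict.counter (connections.map (fun c => c.2.1))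
  let by_count := counts.items.foldl
      (fun d p => d.modify p.2 [] (fun l => l ++ [p.1])) PySem.Dict.empty
  let counts_by_domain := (PySem.List.sorted by_count.keys (fun v => v)).foldl
      (fun d num => (by_count.getD num []).foldl
        (fun d q => d.modify q.2 [] (fun l => l ++ [(q.1, num)])) d)
      PySem.Dict.empty
  counts_by_domain.items

-- ===== PRECONDITION & SPEC =====
def Spec_get_url_counts_py (connections : List (String × (String × String) × String × String)) (out : List (String × List (String × Int))) : Prop := out = get_url_counts_py_alt connections
instance (connections : List (String × (String × String) × String × String)) (out : List (String × List (String × Int))) : Decidable (Spec_get_url_counts_py connections out) := by unfold Spec_get_url_counts_py; infer_instance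

-- ===== CLAIM (what is proved, stated in full; the proofs are below) =====
def Claim_equal_get_url_counts_py : Prop := ∀ (connections : List (String × (String × String) × String × String)), Dom_get_url_counts_py connections → Spec_get_url_counts_py connections (get_url_counts_py connections)

-- ===== LEMMAS AND PROOFS =====

theorem insertBy_forall_before {α : Type} (p : α → α → Bool) (x : α) (L : List α)
    (h : ∀ y ∈ L, p x y = true) : PySem.List.insertBy p x L = x :: L := by
  cases L with
  | nil => rfl
  | cons y ys => simp [PySem.List.insertBy, h y (by simp)]

theorem insertBy_append_not {α : Type} (p : α → α → Bool) (x : α) (L1 L2 : List α)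
    (h : ∀ y ∈ L1, p x y = false) :
    PySem.List.insertBy p x (L1 ++ L2) = L1 ++ PySem.List.insertBy p x L2 := by
  induction L1 with
  | nil => rfl
  | cons y ys ih =>
      simp only [List.cons_append, PySem.List.insertBy, h y (by simp)]
      simp only [Bool.false_eq_true, if_false, List.cons.injEq, true_and]
      exact ih (fun z hz => h z (by simp [hz]))

theorem sorted_snoc {α κ : Type} [LT κ] [DecidableLT κ] (key : α → κ) (xs : List α) (x : α) :
    PySem.List.sorted (xs ++ [x]) key =
      PySem.List.insertBy (fun a b => decide (key a < key b)) x (PySem.List.sorted xs key) := by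
  rw [PySem.List.sorted_eq_foldl_insertBy, PySem.List.sorted_eq_foldl_insertBy, List.foldl_append]
  rfl

theorem flatMap_congr_mem {α β : Type} (l : List α) (f g : α → List β)
    (h : ∀ v ∈ l, f v = g v) : l.flatMap f = l.flatMap g := by
  induction l with
  | nil => rfl
  | cons v vs ih =>
      simp only [List.flatMap_cons, h v (by simp)]
      rw [ih (fun w hw => h w (by simp [hw]))]

-- inserting x into a bucket decomposition: x lands at the end of its key's bucket
-- (creating the bucket at the sorted position of (key x) if it is new)
theorem insertBy_flatMap {α : Type} (key : α → Int) (x : α)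
    (S : List Int) (hS : S.Pairwise (· < ·))
    (f : Int → List α) (hf : ∀ v, ∀ a ∈ f v, key a = v)
    (hfx : key x ∉ S → f (key x) = []) :
    PySem.List.insertBy (fun a b => decide (key a < key b)) x (S.flatMap f)
      = (if key x ∈ S then S else PySem.List.insertBy (fun a b => decide (a < b)) (key x) S).flatMap
          (fun v => f v ++ if key x == v then [x] else []) := by
  induction S with
  | nil =>
      simp [PySem.List.insertBy, hfx (by simp)]
  | cons v S' ih =>
      have hv : ∀ w ∈ S', v < w := fun w hw => List.rel_of_pairwise_cons hS hw
      have hS' : S'.Pairwise (· < ·) := hS.of_cons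
      rcases lt_trichotomy (key x) v with hlt | heq | hgt
      · -- key x < v : x becomes the first bucket
        have hmem : key x ∉ v :: S' := by
          intro hm
          rcases List.mem_cons.mp hm with h1 | h2
          · omega
          · exact absurd (hv _ h2) (by omega)
        have hLHS : PySem.List.insertBy (fun a b => decide (key a < key b)) x ((v :: S').flatMap f)
            = x :: (v :: S').flatMap f := by
          apply insertBy_forall_before
          intro y hy
          simp only [List.mem_flatMap] at hy
          obtain ⟨w, hw, hyw⟩ := hy
          have := hf w y hyw
          rcases List.mem_cons.mp hw with h1 | h2
          · subst h1; simp only [this, decide_eq_true_eq]; omega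
          · have h3 := hv w h2
            simp only [this, decide_eq_true_eq]
            omega
        rw [hLHS, if_neg hmem]
        have hins : PySem.List.insertBy (fun a b => decide (a < b)) (key x) (v :: S')
            = key x :: v :: S' := by
          simp [PySem.List.insertBy, hlt]
        rw [hins]
        simp only [List.flatMap_cons]
        rw [hfx hmem]
        have hne : (key x == v) = false := by simp; omega
        rw [flatMap_congr_mem S' (fun w => f w ++ if key x == w then [x] else []) f
          (by intro w hw; have := hv w hw; simp; omega)]
        simp [hne]
      · -- key x = v : x appended to bucket v
        have hmemS' : key x ∉ S' := by
          intro hm; have := hv _ hm; omega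
        rw [if_pos (by simp [heq])]
        simp only [List.flatMap_cons]
        rw [insertBy_append_not _ _ (f v) _
          (by intro y hy; have := hf v y hy; simp [this]; omega)]
        rw [insertBy_forall_before _ _ _
          (by intro y hy
              simp only [List.mem_flatMap] at hy
              obtain ⟨w, hw, hyw⟩ := hy
              have h1 := hf w y hyw
              have h2 := hv w hw
              simp [h1]; omega)]
        have heb : (key x == v) = true := by simp [heq]
        rw [flatMap_congr_mem S' (fun w => f w ++ if key x == w then [x] else []) f
          (by intro w hw; have := hv w hw; simp; omega)]
        simp [heb]
      · -- v < key x : skip bucket v, recurse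
        simp only [List.flatMap_cons]
        rw [insertBy_append_not _ _ (f v) _
          (by intro y hy; have := hf v y hy; simp [this]; omega)]
        have hfx' : key x ∉ S' → f (key x) = [] := by
          intro h; exact hfx (by simp; constructor <;> [omega; exact h])
        rw [ih hS' hfx']
        have hne : (key x == v) = false := by simp; omega
        by_cases hm : key x ∈ S'
        · rw [if_pos hm, if_pos (List.mem_cons_of_mem _ hm)]
          simp only [List.flatMap_cons, hne, Bool.false_eq_true, if_false, List.append_nil]
        · rw [if_neg hm, if_neg (by
            simp only [List.mem_cons, not_or]
            exact ⟨by omega, hm⟩)]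
          have : PySem.List.insertBy (fun a b => decide (a < b)) (key x) (v :: S')
              = v :: PySem.List.insertBy (fun a b => decide (a < b)) (key x) S' := by
            simp only [PySem.List.insertBy, decide_eq_true_eq, if_neg (by omega : ¬ key x < v)]
          rw [this]
          simp only [List.flatMap_cons, hne, Bool.false_eq_true, if_false, List.append_nil]

-- the stable sort by an Int key is the concatenation, over the distinct key values in
-- increasing order, of the original sublists of each key value
theorem stable_sort_buckets {α : Type} (key : α → Int) (xs : List α) :
    (PySem.List.sorted (PySem.Set.ofList (xs.map key)) (fun v => v)).flatMap
        (fun v => xs.filter (fun a => key a == v))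
      = PySem.List.sorted xs key := by
  induction xs using List.reverseRecOn with
  | nil => rfl
  | append_singleton xs x ih =>
      rw [sorted_snoc, ← ih]
      have hset : PySem.Set.ofList ((xs ++ [x]).map key)
          = PySem.Set.add (PySem.Set.ofList (xs.map key)) (key x) := by
        rw [List.map_append]
        rw [PySem.Set.ofList_eq_foldl, PySem.Set.ofList_eq_foldl, List.foldl_append]
        rfl
      have hS := PySem.List.sorted_ofList_pairwise_lt (xs.map key)
      have hf : ∀ v : Int, ∀ a ∈ xs.filter (fun a => key a == v), key a = v := by
        intro v a ha
        have := List.of_mem_filter ha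
        simpa using this
      have hfilter : ∀ v : Int, (xs ++ [x]).filter (fun a => key a == v)
          = xs.filter (fun a => key a == v) ++ if key x == v then [x] else [] := by
        intro v
        rw [List.filter_append]
        congr 1
        cases h : key x == v
        · simp [List.filter, h]
        · simp [List.filter, h]
      rw [insertBy_flatMap key x _ hS _ hf
        (by intro h
            have hnm : key x ∉ xs.map key := by
              intro hmm
              exact h (by
                rw [PySem.List.mem_sorted]
                exact (PySem.Set.mem_ofList _ _).mpr hmm)
            rw [List.filter_eq_nil_iff]
            intro a ha
            simp only [beq_iff_eq]
            intro hne
            exact hnm (by rw [← hne]; exact List.mem_map_of_mem ha))]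
      rw [hset]
      by_cases hc : key x ∈ PySem.Set.ofList (xs.map key)
      · have : PySem.Set.add (PySem.Set.ofList (xs.map key)) (key x)
            = PySem.Set.ofList (xs.map key) := by
          simp [PySem.Set.add, PySem.Set.contains, hc]
        rw [this, if_pos (by rw [PySem.List.mem_sorted]; exact hc)]
        exact flatMap_congr_mem _ _ _ (fun v hv => hfilter v)
      · have : PySem.Set.add (PySem.Set.ofList (xs.map key)) (key x)
            = PySem.Set.ofList (xs.map key) ++ [key x] := by
          simp [PySem.Set.add, PySem.Set.contains, hc]
        rw [this, sorted_snoc (fun v => v), if_neg (by rw [PySem.List.mem_sorted]; exact hc)]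
        exact flatMap_congr_mem _ _ _ (fun v hv => hfilter v)

theorem get_url_counts_py_eq (connections : List (String × (String × String) × String × String)) :
    get_url_counts_py connections = get_url_counts_py_alt connections := by
  simp only [get_url_counts_py, get_url_counts_py_alt]
  congr 1
  set items := (PySem.Dict.counter (connections.map (fun c => c.2.1))).items with hitems
  set by_count := items.foldl
      (fun d p => d.modify p.2 [] (fun l => l ++ [p.1])) PySem.Dict.empty with hbc
  -- B's grouping dict: keys are the distinct counts, each bucket is the insertion-order sublist
  have hkeys : by_count.keys = PySem.Set.ofList (items.map (fun p => p.2)) := by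
    rw [hbc, PySem.Dict.keys_foldl_modify_key items (fun p => p.2)]
    rw [PySem.Set.ofList_eq_foldl]
    rfl
  have hbucket : ∀ num : Int, by_count.getD num []
      = (items.filter (fun p => p.2 == num)).map (fun p => p.1) := by
    intro num
    rw [hbc]
    have : items.foldl (fun d p => d.modify p.2 [] (fun l => l ++ [p.1])) PySem.Dict.empty
        = (items.map (fun p => (p.2, p.1))).foldl
            (fun d q => d.modify q.1 [] (fun l => l ++ [q.2])) PySem.Dict.empty := by
      rw [List.foldl_map]
    rw [this, PySem.Dict.getD_foldl_modify_append]
    simp [List.filter_map, List.map_map, Function.comp_def]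
  -- B's nested loop is a single fold over the bucket decomposition
  have hinner : ∀ (num : Int) (d : PySem.Dict String (List (String × Int))),
      (by_count.getD num []).foldl
          (fun d q => d.modify q.2 [] (fun l => l ++ [(q.1, num)])) d
        = (items.filter (fun p => p.2 == num)).foldl
            (fun d p => d.modify p.1.2 [] (fun l => l ++ [(p.1.1, p.2)])) d := by
    intro num d
    rw [hbucket num, List.foldl_map]
    apply PySem.List.foldl_congr_mem
    intro acc p hp
    have hpe : p.2 = num := by simpa using List.of_mem_filter hp
    rw [hpe]
  have houter : (PySem.List.sorted by_count.keys (fun v => v)).foldl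
      (fun d num => (by_count.getD num []).foldl
        (fun d q => d.modify q.2 [] (fun l => l ++ [(q.1, num)])) d)
      PySem.Dict.empty
      = ((PySem.List.sorted (PySem.Set.ofList (items.map (fun p => p.2))) (fun v => v)).flatMap
          (fun num => items.filter (fun p => p.2 == num))).foldl
          (fun d p => d.modify p.1.2 [] (fun l => l ++ [(p.1.1, p.2)])) PySem.Dict.empty := by
    rw [hkeys, List.foldl_flatMap]
    apply PySem.List.foldl_congr_mem
    intro acc num _
    exact hinner num acc
  rw [houter]
  have hbkt := stable_sort_buckets (fun p : (String × String) × Int => p.2) items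
  rw [hbkt]
  apply PySem.List.foldl_congr_mem
  intro acc p _
  -- A's try/append/except step equals B's setdefault-append (Dict.modify) step
  simp only [PySem.Dict.modify, PySem.Dict.getD]
  cases acc.get? p.1.2 with
  | none => simp
  | some lst => simp

-- ===== VERDICT (by name: the statement is the Claim_ definition above) =====
theorem get_url_counts_py_spec : Claim_equal_get_url_counts_py := by
  intro connections _
  unfold Spec_get_url_counts_py
  exact get_url_counts_py_eq connections
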